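-- pv_equiv track=rewrite | github.com/wiegerw/nerva | python/make_packages.py | split_license
-- ===== SOURCE A (Python) =====
-- def split_license(text):
--     lines = text.split('\n')
--     license = []
--     code = []
--
--     def is_license(line: str):
--         return line.strip().startswith("# ")
--
--     inside_license = True
--
--     for line in lines:
--         if not is_license(line):
--             inside_license = False
--         if inside_license:
--             license.append(line)
--         else:
--             code.append(line)
--
--     return '\n'.join(license).strip(), '\n'.join(code).strip()
-- ===== SOURCE B (Python) =====
-- def split_license(text):
--     lines = text.split('\n')
--     i = next((k for k, line in enumerate(lines)
--               if not line.strip().startswith('# ')), len(lines))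
--     return '\n'.join(lines[:i]).strip(), '\n'.join(lines[i:]).strip()
-- ===== Notes on version B (the rewrite author's own statement) =====
-- stated objective: simpler
-- what changed: Replaced the stateful flag-driven accumulation loop with a single boundary search (index of the first non-license line) followed by two slices.
import Mathlib
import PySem

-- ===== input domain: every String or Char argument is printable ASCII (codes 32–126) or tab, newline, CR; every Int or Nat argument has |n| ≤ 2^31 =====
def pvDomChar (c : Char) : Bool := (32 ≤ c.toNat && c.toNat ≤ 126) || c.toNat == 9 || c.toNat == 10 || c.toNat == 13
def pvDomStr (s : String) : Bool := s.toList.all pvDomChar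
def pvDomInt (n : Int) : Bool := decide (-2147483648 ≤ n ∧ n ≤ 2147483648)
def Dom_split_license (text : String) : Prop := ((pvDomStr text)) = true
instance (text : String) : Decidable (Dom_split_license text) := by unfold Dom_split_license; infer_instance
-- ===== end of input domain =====

-- B is simpler: it finds the boundary index first and slices, instead of A's flag-driven accumulation loop.

-- ===== PORT A =====
-- text.split('\n'): sep is the non-empty literal "\n", so Str.split? is always some; .getD [] only strips the option
-- is_license(line)
def pvIsLicense (line : String) : Bool :=
  PySem.Str.startswith (PySem.Str.strip line) "# "

-- one iteration of A's for-loop over state (license, code, inside_license)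
def pvStepA (st : List String × List String × Bool) (line : String) :
    List String × List String × Bool :=
  let inside := if !pvIsLicense line then false else st.2.2
  if inside then (st.1 ++ [line], st.2.1, inside) else (st.1, st.2.1 ++ [line], inside)

def split_license (text : String) : String × String :=
  let lines := (PySem.Str.split? text "\n").getD []
  let st := lines.foldl pvStepA ([], [], true)
  (PySem.Str.strip (PySem.Str.join "\n" st.1), PySem.Str.strip (PySem.Str.join "\n" st.2.1))

-- ===== PORT B =====
-- Source B's boundary search: index of the first line that is not a license line, defaulting to len(lines)
def pvBoundary : List String → Nat
  | [] => 0
  | l :: ls => if pvIsLicense l then pvBoundary ls + 1 else 0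

def split_license_alt (text : String) : String × String :=
  let lines := (PySem.Str.split? text "\n").getD []
  let i := pvBoundary lines
  (PySem.Str.strip (PySem.Str.join "\n" (PySem.List.slice lines none (some (i : Int)))),
   PySem.Str.strip (PySem.Str.join "\n" (PySem.List.slice lines (some (i : Int)) none)))

-- ===== PRECONDITION & SPEC =====
def Spec_split_license (text : String) (out : String × String) : Prop := out = split_license_alt text
instance (text : String) (out : String × String) : Decidable (Spec_split_license text out) := by unfold Spec_split_license; infer_instance

-- ===== CLAIM (what is proved, stated in full; the proofs are below) =====
def Claim_equal_split_license : Prop := ∀ (text : String), Dom_split_license text → Spec_split_license text (split_license text)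

-- ===== LEMMAS AND PROOFS =====

-- once inside_license is false, every line goes to code
theorem foldl_stepA_false (xs : List String) (lic code : List String) :
    xs.foldl pvStepA (lic, code, false) = (lic, code ++ xs, false) := by
  induction xs generalizing code with
  | nil => simp
  | cons l ls ih =>
      simp [pvStepA, List.foldl_cons, ih]

-- A's loop from the initial (true) state: license = take (pvBoundary xs), code = drop (pvBoundary xs)
theorem foldl_stepA_true (xs : List String) (lic code : List String) :
    (xs.foldl pvStepA (lic, code, true)).1 = lic ++ xs.take (pvBoundary xs) ∧
    (xs.foldl pvStepA (lic, code, true)).2.1 = code ++ xs.drop (pvBoundary xs) := by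
  induction xs generalizing lic code with
  | nil => simp
  | cons l ls ih =>
      by_cases h : pvIsLicense l
      · have := ih (lic ++ [l]) code
        simp [pvStepA, pvBoundary, h, List.foldl_cons, this]
      · simp [pvStepA, pvBoundary, h, List.foldl_cons, foldl_stepA_false]

-- ===== VERDICT (by name: the statement is the Claim_ definition above) =====
theorem split_license_spec : Claim_equal_split_license := by
  intro text _
  unfold Spec_split_license split_license split_license_alt
  have h := foldl_stepA_true ((PySem.Str.split? text "\n").getD []) [] []
  simp only [List.nil_append] at h
  simp [h.1, h.2, PySem.List.slice_to_natCast, PySem.List.slice_from_natCast]
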